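-- pv_equiv track=rewrite | github.com/kenneth-ge/voice-text | text-edit/editor.py | split_paren_quotes
-- ===== SOURCE A (Python) =====
-- def swap(c):
--     return '"' if c == "'" else "'"
--
-- def split_paren_quotes(text):
--     # very simple algorithm, assuming it's balanced
--     # only capture outer groups, since our algorithm below is sequential (does not take
--     # recursive relations into account and simply concatenates string sections)
--     count_paren = 0
--     count_quot = 0
--     curr_quot = "'"
--     #wait_until_whitespace = False
--
--     strings = []
--     curr_str = ""
--     for c in text:
--         prev_sum = count_paren + count_quot
--         if c == ')':
--             count_paren -= 1
--         elif c == '(':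
--             count_paren += 1
--         elif c == '"' or c == "'":
--             # you can't have nested " marks, unless you have '
--             if curr_quot == c:
--                 count_quot -= 1
--                 curr_quot = swap(curr_quot)
--             else:
--                 count_quot += 1
--                 curr_quot = swap(curr_quot)
--         new_sum = count_paren + count_quot
--
--         '''if wait_until_whitespace:
--             if c.isspace():
--                 strings.append((curr_str, False))
--                 curr_str = ""
--                 curr_str += c
--                 wait_until_whitespace = False
--             else:
--                 curr_str += c
--         el'''
--         if prev_sum != 0 and new_sum == 0:
--             curr_str += c
--             strings.append((curr_str, False))
--             curr_str = ""
--             #wait_until_whitespace = True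
--         elif prev_sum == 0 and new_sum != 0:
--             strings.append((curr_str, True))
--             curr_str = ""
--             curr_str += c
--         else:
--             curr_str += c
--
--     if len(curr_str) > 0:
--         strings.append((curr_str, True))
--
--     return strings
-- ===== SOURCE B (Python) =====
-- def split_paren_quotes(text):
--     # Pass 1: per-character deltas to the combined paren+quote depth.
--     # The k-th quote character (0-indexed) is compared against ' for even k
--     # and " for odd k (A's curr_quot toggles on every quote char).
--     deltas = []
--     quotes_seen = 0
--     for c in text:
--         if c == '(':
--             deltas.append(1)
--         elif c == ')':
--             deltas.append(-1)
--         elif c == "'" or c == '"':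
--             expected = "'" if quotes_seen % 2 == 0 else '"'
--             deltas.append(-1 if c == expected else 1)
--             quotes_seen += 1
--         else:
--             deltas.append(0)
--     # Pass 2: prefix sums (depth after each character).
--     sums = []
--     total = 0
--     for d in deltas:
--         total += d
--         sums.append(total)
--     # Pass 3: cut the text into slices at depth 0-crossings.
--     out = []
--     start = 0
--     prev = 0
--     for i, s in enumerate(sums):
--         if prev == 0 and s != 0:
--             out.append((text[start:i], True))
--             start = i
--         elif prev != 0 and s == 0:
--             out.append((text[start:i + 1], False))
--             start = i + 1
--         prev = s
--     if start < len(text):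
--         out.append((text[start:], True))
--     return out
-- ===== Notes on version B (the rewrite author's own statement) =====
-- stated objective: alternative
-- what changed: Replaces A's single stateful fold that accumulates the current segment character by character with a three-pass pipeline: per-character depth deltas (quote parity instead of a toggled curr_quot variable), prefix sums, and a segmentation pass that emits slices of the input at depth 0-crossings instead of building segment strings incrementally.
import Mathlib
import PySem

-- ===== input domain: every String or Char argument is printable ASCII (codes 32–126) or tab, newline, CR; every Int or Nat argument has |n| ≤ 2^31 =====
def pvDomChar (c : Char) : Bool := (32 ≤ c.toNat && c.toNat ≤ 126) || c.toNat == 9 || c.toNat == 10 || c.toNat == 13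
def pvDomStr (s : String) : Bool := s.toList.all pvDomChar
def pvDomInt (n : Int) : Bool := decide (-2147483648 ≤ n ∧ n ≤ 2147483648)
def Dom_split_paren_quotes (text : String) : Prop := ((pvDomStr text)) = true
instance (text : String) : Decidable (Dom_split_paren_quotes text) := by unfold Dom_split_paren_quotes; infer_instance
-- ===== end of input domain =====

-- B replaces A's single stateful fold with a three-pass pipeline (deltas, prefix
-- sums, slice-based segmentation at depth 0-crossings): an alternative decomposition.


-- ===== PORT A =====
def swapQ (c : Char) : Char := if c = '\'' then '"' else '\''

-- A's loop: state (count_paren, count_quot, curr_quot, strings, curr_str);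
-- curr_str kept as List Char (Python string concatenation char by char).
def splitLoopA : List Char → Int → Int → Char → List (String × Bool) → List Char → List (String × Bool)
  | [], _, _, _, strings, curr =>
      if curr.length > 0 then strings ++ [(String.ofList curr, true)] else strings
  | c :: rest, cp, cq, cqc, strings, curr =>
      let prev := cp + cq
      let st :=
        if c = ')' then (cp - 1, cq, cqc)
        else if c = '(' then (cp + 1, cq, cqc)
        else if c = '"' ∨ c = '\'' then
          if cqc = c then (cp, cq - 1, swapQ cqc) else (cp, cq + 1, swapQ cqc)
        else (cp, cq, cqc)
      let newSum := st.1 + st.2.1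
      if prev ≠ 0 ∧ newSum = 0 then
        splitLoopA rest st.1 st.2.1 st.2.2 (strings ++ [(String.ofList (curr ++ [c]), false)]) []
      else if prev = 0 ∧ newSum ≠ 0 then
        splitLoopA rest st.1 st.2.1 st.2.2 (strings ++ [(String.ofList curr, true)]) [c]
      else
        splitLoopA rest st.1 st.2.1 st.2.2 strings (curr ++ [c])

def split_paren_quotes (text : String) : List (String × Bool) :=
  splitLoopA text.toList 0 0 '\'' [] []

-- ===== PORT B =====
-- pass 1: per-character deltas; quotes_seen parity replaces the toggled variable
def deltasLoop : List Char → Nat → List Int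
  | [], _ => []
  | c :: rest, q =>
      if c = '(' then 1 :: deltasLoop rest q
      else if c = ')' then -1 :: deltasLoop rest q
      else if c = '\'' ∨ c = '"' then
        (if c = (if q % 2 = 0 then '\'' else '"') then (-1 : Int) else 1) :: deltasLoop rest (q + 1)
      else 0 :: deltasLoop rest q

-- pass 2: prefix sums
def sumsLoop : List Int → Int → List Int
  | [], _ => []
  | d :: rest, t => (t + d) :: sumsLoop rest (t + d)

-- pass 3: segmentation; text[a:b] with 0 ≤ a ≤ b ported exactly as (drop a).take (b-a)
def segLoop (tl : List Char) : List Int → Nat → Nat → Int → List (String × Bool) →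
    List (String × Bool) × Nat
  | [], _, start, _, out => (out, start)
  | s :: rest, i, start, prev, out =>
      if prev = 0 ∧ s ≠ 0 then
        segLoop tl rest (i + 1) i s (out ++ [(String.ofList ((tl.drop start).take (i - start)), true)])
      else if prev ≠ 0 ∧ s = 0 then
        segLoop tl rest (i + 1) (i + 1) s (out ++ [(String.ofList ((tl.drop start).take (i + 1 - start)), false)])
      else
        segLoop tl rest (i + 1) start s out

def split_paren_quotes_alt (text : String) : List (String × Bool) :=
  let tl := text.toList
  let sums := sumsLoop (deltasLoop tl 0) 0
  let r := segLoop tl sums 0 0 0 []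
  if r.2 < tl.length then r.1 ++ [(String.ofList (tl.drop r.2), true)] else r.1

-- ===== PRECONDITION & SPEC =====
def Spec_split_paren_quotes (text : String) (out : List (String × Bool)) : Prop := out = split_paren_quotes_alt text
instance (text : String) (out : List (String × Bool)) : Decidable (Spec_split_paren_quotes text out) := by unfold Spec_split_paren_quotes; infer_instance

-- ===== CLAIM (what is proved, stated in full; the proofs are below) =====
def Claim_equal_split_paren_quotes : Prop := ∀ (text : String), Dom_split_paren_quotes text → Spec_split_paren_quotes text (split_paren_quotes text)

-- ===== LEMMAS AND PROOFS =====

-- the quote character A's curr_quot holds after q quote characters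
def expQ (q : Nat) : Char := if q % 2 = 0 then '\'' else '\"'

-- B's final step: emit the leftover segment
def finalizeB (tl : List Char) (r : List (String × Bool) × Nat) : List (String × Bool) :=
  if r.2 < tl.length then r.1 ++ [(String.ofList (tl.drop r.2), true)] else r.1

theorem swap_expQ (q : Nat) : swapQ (expQ q) = expQ (q + 1) := by
  unfold swapQ expQ
  rcases Nat.mod_two_eq_zero_or_one q with h | h <;> simp [h, Nat.add_mod]

theorem take_succ_of_drop {tl : List Char} {i start : Nat} {c : Char} {rest : List Char}
    (hs : start ≤ i) (hd : tl.drop i = c :: rest) :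
    (tl.drop start).take (i + 1 - start) = (tl.drop start).take (i - start) ++ [c] := by
  have hi : i < tl.length := by
    by_contra h
    simp [List.drop_eq_nil_of_le (le_of_not_gt h)] at hd
  have hget : tl[i]'hi = c := by
    have h0 : (List.drop i tl)[0]'(by simp [hd]) = c := by simp [hd]
    simpa [List.getElem_drop] using h0
  have h1 : i + 1 - start = (i - start) + 1 := by omega
  rw [h1, List.take_add_one]
  have hlen : i - start < (tl.drop start).length := by
    simp [List.length_drop]; omega
  simp [List.getElem?_eq_getElem hlen, List.getElem_drop,
        show start + (i - start) = i by omega, hget]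

-- one step of the segmentation, shared by all four character classes
theorem key_step (tl : List Char) (c : Char) (rest : List Char) (i start : Nat)
    (cp cq cp' cq' d : Int) (q' : Nat) (strings : List (String × Bool))
    (hd : tl.drop i = c :: rest) (hsi : start ≤ i)
    (hsum : cp' + cq' = cp + cq + d)
    (IH : ∀ (start' : Nat) (strings' : List (String × Bool)), start' ≤ i + 1 →
        splitLoopA rest cp' cq' (expQ q') strings'
            ((tl.drop start').take (i + 1 - start')) =
          finalizeB tl (segLoop tl (sumsLoop (deltasLoop rest q') (cp' + cq'))
            (i + 1) start' (cp' + cq') strings')) :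
    (if cp + cq ≠ 0 ∧ cp' + cq' = 0 then
        splitLoopA rest cp' cq' (expQ q')
          (strings ++ [(String.ofList ((tl.drop start).take (i - start) ++ [c]), false)]) []
      else if cp + cq = 0 ∧ cp' + cq' ≠ 0 then
        splitLoopA rest cp' cq' (expQ q')
          (strings ++ [(String.ofList ((tl.drop start).take (i - start)), true)]) [c]
      else
        splitLoopA rest cp' cq' (expQ q') strings ((tl.drop start).take (i - start) ++ [c])) =
    finalizeB tl (segLoop tl ((cp + cq + d) :: sumsLoop (deltasLoop rest q') (cp + cq + d))
      i start (cp + cq) strings) := by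
  rw [← hsum]
  simp only [segLoop]
  by_cases hp : cp + cq = 0 <;> by_cases hn : cp' + cq' = 0
  · -- 0 → 0 : plain accumulation
    rw [if_neg (by tauto), if_neg (by tauto), if_neg (by tauto), if_neg (by tauto),
        ← take_succ_of_drop hsi hd]
    exact IH start strings (by omega)
  · -- 0 → nonzero : close outside segment with True, start new one at i
    rw [if_neg (by tauto), if_pos ⟨hp, hn⟩, if_pos ⟨hp, hn⟩,
        show [c] = (tl.drop i).take (i + 1 - i) by simp [hd]]
    exact IH i _ (by omega)
  · -- nonzero → 0 : close segment with False
    rw [if_pos ⟨hp, hn⟩, if_neg (by tauto), if_pos ⟨hp, hn⟩,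
        ← take_succ_of_drop hsi hd,
        show ([] : List Char) = (tl.drop (i+1)).take (i + 1 - (i+1)) by simp]
    exact IH (i + 1) _ (by omega)
  · -- nonzero → nonzero : plain accumulation
    rw [if_neg (by tauto), if_neg (by tauto), if_neg (by tauto), if_neg (by tauto),
        ← take_succ_of_drop hsi hd]
    exact IH start strings (by omega)

-- main invariant: A's loop over the suffix equals B's segmentation over the
-- suffix's prefix sums, when curr_str is the slice tl[start:i].
theorem main_inv (rest : List Char) : ∀ (tl : List Char) (i start : Nat) (cp cq : Int) (q : Nat)
    (strings : List (String × Bool)),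
    tl.drop i = rest → start ≤ i → i ≤ tl.length →
    splitLoopA rest cp cq (expQ q) strings ((tl.drop start).take (i - start)) =
      finalizeB tl (segLoop tl (sumsLoop (deltasLoop rest q) (cp + cq)) i start (cp + cq) strings) := by
  induction rest with
  | nil =>
      intro tl i start cp cq q strings hd hsi hil
      have hi : i = tl.length := by
        have := List.drop_eq_nil_iff.mp hd
        omega
      subst hi
      simp only [deltasLoop, sumsLoop, segLoop, splitLoopA, finalizeB]
      by_cases h : start < tl.length
      · simp [h,
          List.take_of_length_le (by simp [List.length_drop] : (tl.drop start).length ≤ tl.length - start)]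
      · have hse : start = tl.length := by omega
        simp [hse, List.drop_eq_nil_of_le (le_refl tl.length)]
  | cons c rest ih =>
      intro tl i start cp cq q strings hd hsi hil
      have hi : i < tl.length := by
        by_contra h
        simp [List.drop_eq_nil_of_le (le_of_not_gt h)] at hd
      have hd' : tl.drop (i + 1) = rest := by
        rw [← List.drop_drop, hd]
        rfl
      have IH : ∀ (cp' cq' : Int) (q' : Nat), ∀ (start' : Nat) (strings' : List (String × Bool)),
          start' ≤ i + 1 →
          splitLoopA rest cp' cq' (expQ q') strings'
              ((tl.drop start').take (i + 1 - start')) =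
            finalizeB tl (segLoop tl (sumsLoop (deltasLoop rest q') (cp' + cq'))
              (i + 1) start' (cp' + cq') strings') := by
        intro cp' cq' q' start' strings' hle
        exact ih tl (i + 1) start' cp' cq' q' strings' hd' hle (by omega)
      by_cases hc1 : c = ')'
      · have hne2 : ¬ c = '(' := by subst hc1; decide
        simp only [splitLoopA, deltasLoop, sumsLoop, if_pos hc1, if_neg hne2]
        exact key_step tl c rest i start cp cq (cp - 1) cq (-1) q strings hd hsi
          (by ring) (IH _ _ _)
      · by_cases hc2 : c = '('
        · simp only [splitLoopA, deltasLoop, sumsLoop, if_neg hc1, if_pos hc2]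
          exact key_step tl c rest i start cp cq (cp + 1) cq 1 q strings hd hsi
            (by ring) (IH _ _ _)
        · by_cases hc3 : c = '\"' ∨ c = '\''
          · have hq : (c = '\'' ∨ c = '\"') := hc3.symm
            have hexp : (if q % 2 = 0 then '\'' else '\"') = expQ q := rfl
            by_cases hm : expQ q = c
            · -- matching quote: delta -1
              simp only [splitLoopA, deltasLoop, sumsLoop, if_neg hc1, if_neg hc2,
                if_pos hc3, if_pos hq, hexp, if_pos hm, if_pos hm.symm, swap_expQ]
              exact key_step tl c rest i start cp cq cp (cq - 1) (-1) (q + 1) strings hd hsi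
                (by ring) (IH _ _ _)
            · -- mismatching quote: delta +1
              have hm' : ¬ c = expQ q := fun h => hm h.symm
              simp only [splitLoopA, deltasLoop, sumsLoop, if_neg hc1, if_neg hc2,
                if_pos hc3, if_pos hq, hexp, if_neg hm, if_neg hm', swap_expQ]
              exact key_step tl c rest i start cp cq cp (cq + 1) 1 (q + 1) strings hd hsi
                (by ring) (IH _ _ _)
          · -- any other character: delta 0
            have hq : ¬ (c = '\'' ∨ c = '\"') := fun h => hc3 h.symm
            simp only [splitLoopA, deltasLoop, sumsLoop, if_neg hc1, if_neg hc2,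
              if_neg hc3, if_neg hq]
            exact key_step tl c rest i start cp cq cp cq 0 q strings hd hsi
              (by ring) (IH _ _ _)

theorem alt_eq_finalize (text : String) :
    split_paren_quotes_alt text =
      finalizeB text.toList
        (segLoop text.toList (sumsLoop (deltasLoop text.toList 0) 0) 0 0 0 []) := rfl

-- ===== VERDICT (by name: the statement is the Claim_ definition above) =====
theorem split_paren_quotes_spec : Claim_equal_split_paren_quotes := by
  intro text _
  unfold Spec_split_paren_quotes
  rw [alt_eq_finalize]
  have h := main_inv text.toList text.toList 0 0 0 0 0 [] rfl (le_refl 0) (Nat.zero_le _)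
  simpa [split_paren_quotes, expQ] using h
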